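-- pv_equiv track=rewrite | github.com/dgiesegh/AoC2024 | 09Dec.py | find_last_block
-- ===== SOURCE A (Python) =====
-- def find_last_block(disk, stop):
--     found = False
--     num = 0
--     length = 0
--     index = 0
--     for i in range(stop, -1, -1):
--         if not found and disk[i] != -1:
--             num = disk[i]
--             length += 1
--             found = True
--         elif found and disk[i] != num:
--             index = i+1
--             break
--         elif found:
--             length += 1
--     return index, num, length
-- ===== SOURCE B (Python) =====
-- def find_last_block(disk, stop):
--     # Forward run-length scan: walk runs of equal values left-to-right over
--     # disk[0..stop], remembering the most recent run whose value is not -1.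
--     best = (0, 0, 0)
--     i = 0
--     while i <= stop:
--         v = disk[i]
--         j = i + 1
--         while j <= stop and disk[j] == v:
--             j += 1
--         if v != -1:
--             best = (i, v, j - i)
--         i = j
--     return best
-- ===== Notes on version B (the rewrite author's own statement) =====
-- stated objective: alternative
-- what changed: Replaces A's backward scan with a found/num/length/index state machine by a forward run-length scan: walk disk[0..stop] left-to-right run by run and remember the most recent run whose value is not -1.
import Mathlib
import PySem

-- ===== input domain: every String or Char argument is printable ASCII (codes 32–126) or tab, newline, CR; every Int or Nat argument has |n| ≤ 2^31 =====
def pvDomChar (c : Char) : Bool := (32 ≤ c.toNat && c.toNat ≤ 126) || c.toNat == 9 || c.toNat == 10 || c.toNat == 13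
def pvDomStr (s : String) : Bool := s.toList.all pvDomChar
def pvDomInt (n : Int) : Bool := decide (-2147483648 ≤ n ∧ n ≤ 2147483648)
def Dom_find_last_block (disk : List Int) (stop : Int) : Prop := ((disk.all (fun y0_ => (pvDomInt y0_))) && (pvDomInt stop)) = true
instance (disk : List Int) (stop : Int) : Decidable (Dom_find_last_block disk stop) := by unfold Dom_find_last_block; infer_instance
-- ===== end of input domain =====

-- B replaces A's backward scan with its found/num/length/index state machine by a forward
-- run-length scan over disk[0..stop] that remembers the last run whose value is not -1
-- (objective: alternative).

-- ===== PORT A =====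
-- the for-loop with its four branches and break; state (found, num, length, index)
def flaLoopA (disk : List Int) : List Int → Bool × Int × Int × Int → Int × Int × Int
  | [], (_, num, length, index) => (index, num, length)
  | i :: rest, (found, num, length, index) =>
    let di := (PySem.List.pyGet? disk i).getD 0   -- disk[i]; in range under Pre_
    if !found && di ≠ -1 then flaLoopA disk rest (true, di, length + 1, index)
    else if found && di ≠ num then (i + 1, num, length)   -- break
    else if found then flaLoopA disk rest (found, num, length + 1, index)
    else flaLoopA disk rest (found, num, length, index)

def find_last_block (disk : List Int) (stop : Int) : Int × Int × Int :=
  flaLoopA disk (PySem.List.pyRange stop (-1) (-1)) (false, 0, 0, 0)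

-- ===== PORT B =====
-- inner while loop: while j <= stop and disk[j] == v: j += 1   (fuel = stop - i ≥ remaining steps)
def flbInner (disk : List Int) (stp v : Int) : Nat → Int → Int
  | 0, j => j
  | f + 1, j =>
    if j ≤ stp ∧ (PySem.List.pyGet? disk j).getD 0 = v then flbInner disk stp v f (j + 1) else j

-- outer while loop: one step per run; state (i, best)
def flbOuter (disk : List Int) (stp : Int) : Nat → Int → Int × Int × Int → Int × Int × Int
  | 0, _, best => best
  | f + 1, i, best =>
    if i ≤ stp then
      let v := (PySem.List.pyGet? disk i).getD 0
      let j := flbInner disk stp v (stp - i).toNat (i + 1)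
      flbOuter disk stp f j (if v ≠ -1 then (i, v, j - i) else best)
    else best

def find_last_block_alt (disk : List Int) (stop : Int) : Int × Int × Int :=
  flbOuter disk stop (stop + 1).toNat 0 (0, 0, 0)

-- ===== PRECONDITION & SPEC =====
-- A indexes disk[stop] first, so it raises IndexError iff 0 ≤ stop and stop ≥ len(disk);
-- Pre_ excludes exactly that (stop < 0 is fine: the range is empty).
def Pre_find_last_block (disk : List Int) (stop : Int) : Prop := stop < (disk.length : Int)
instance (disk : List Int) (stop : Int) : Decidable (Pre_find_last_block disk stop) := by unfold Pre_find_last_block; infer_instance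
def pvWitness_find_last_block : List Int × Int := ([1, 1, -1, 2, 2], 4)
def Spec_find_last_block (disk : List Int) (stop : Int) (out : Int × Int × Int) : Prop := out = find_last_block_alt disk stop
instance (disk : List Int) (stop : Int) (out : Int × Int × Int) : Decidable (Spec_find_last_block disk stop out) := by unfold Spec_find_last_block; infer_instance

-- ===== CLAIM (what is proved, stated in full; the proofs are below) =====
def Claim_equal_find_last_block : Prop := ∀ (disk : List Int) (stop : Int), Dom_find_last_block disk stop → Pre_find_last_block disk stop → Spec_find_last_block disk stop (find_last_block disk stop)

-- ===== LEMMAS AND PROOFS =====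

-- proof-side shorthand for disk[k]
def gA (disk : List Int) (k : Int) : Int := (PySem.List.pyGet? disk k).getD 0

-- proof-side reference function R: find the endpoint backwards, then walk the run back.
def flbFindEnd (disk : List Int) : List Int → Option Int
  | [] => none
  | i :: rest =>
    if (PySem.List.pyGet? disk i).getD 0 ≠ -1 then some i else flbFindEnd disk rest

def flbWalk (disk : List Int) (num : Int) : Nat → Nat
  | 0 => 0
  | s + 1 => if (PySem.List.pyGet? disk (s : Int)).getD 0 = num then flbWalk disk num s else s + 1

def flaRef (disk : List Int) (stop : Int) : Int × Int × Int :=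
  match flbFindEnd disk (PySem.List.pyRange stop (-1) (-1)) with
  | none => (0, 0, 0)
  | some e =>
    let num := (PySem.List.pyGet? disk e).getD 0
    let start : Int := (flbWalk disk num e.toNat : Nat)
    (start, num, e - start + 1)

-- ===== A = R =====

-- found phase: A's remaining loop over [s-1, …, 0] vs R's walk down from s
theorem flaLoop_found (disk : List Int) (num : Int) :
    ∀ (s : Nat) (len : Int),
      flaLoopA disk (PySem.List.pyRange ((s : Int) - 1) (-1) (-1)) (true, num, len, 0)
        = (((flbWalk disk num s : Nat) : Int), num,
           len + ((s : Int) - ((flbWalk disk num s : Nat) : Int)))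
  | 0, len => by
      rw [PySem.List.pyRange_neg_one_eq_nil (by omega)]
      simp [flaLoopA, flbWalk]
  | s + 1, len => by
      rw [show ((s + 1 : Nat) : Int) - 1 = (s : Int) by push_cast; ring,
          PySem.List.pyRange_neg_one_cons (by omega : (-1 : Int) < (s : Int))]
      by_cases h : disk[s]?.getD 0 = num
      · simp only [flaLoopA]
        rw [if_neg (by simp), if_neg (by simp [h]), if_pos (by simp),
            flaLoop_found disk num s (len + 1)]
        simp only [flbWalk]
        rw [if_pos (by simpa using h)]
        simp only [Prod.mk.injEq]
        refine ⟨?_, ?_, ?_⟩ <;> first | trivial | rfl | (push_cast; ring)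
      · simp only [flaLoopA]
        rw [if_neg (by simp), if_pos (by simp [h])]
        simp only [flbWalk]
        rw [if_neg (by simpa using h)]
        simp only [Prod.mk.injEq]
        refine ⟨?_, ?_, ?_⟩ <;> first | trivial | rfl | (push_cast; ring)

-- search phase: A's loop over [n, …, 0] with found = false vs R's findEnd-then-walk
theorem flaLoop_search (disk : List Int) :
    ∀ n : Nat, flaLoopA disk (PySem.List.pyRange (n : Int) (-1) (-1)) (false, 0, 0, 0)
      = (match flbFindEnd disk (PySem.List.pyRange (n : Int) (-1) (-1)) with
         | none => (0, 0, 0)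
         | some e =>
           let num := (PySem.List.pyGet? disk e).getD 0
           let start : Int := (flbWalk disk num e.toNat : Nat)
           (start, num, e - start + 1))
  | n => by
      rw [PySem.List.pyRange_neg_one_cons (by omega : (-1 : Int) < (n : Int))]
      by_cases h : disk[n]?.getD 0 = -1
      · -- still searching: A falls to the last branch with state unchanged, R skips i
        simp only [flaLoopA, flbFindEnd]
        rw [if_neg (by simp [h]), if_neg (by simp), if_neg (by simp), if_neg (by simp [h])]
        cases n with
        | zero =>
            rw [show ((0 : Nat) : Int) - 1 = -1 by norm_num,
                PySem.List.pyRange_neg_one_eq_nil (by omega : (-1 : Int) ≤ -1)]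
            simp [flaLoopA, flbFindEnd]
        | succ m =>
            rw [show ((m + 1 : Nat) : Int) - 1 = (m : Int) by push_cast; ring]
            exact flaLoop_search disk m
      · -- found at n
        simp only [flaLoopA, flbFindEnd]
        rw [if_pos (by simp [h]), if_pos (by simp [h]),
            flaLoop_found disk _ n (0 + 1)]
        simp only [Int.toNat_natCast, Prod.mk.injEq]
        refine ⟨?_, ?_, ?_⟩ <;> first | trivial | rfl | (push_cast; ring)

theorem a_eq_ref (disk : List Int) (stop : Int) :
    find_last_block disk stop = flaRef disk stop := by
  unfold find_last_block flaRef
  by_cases h : stop ≤ -1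
  · rw [PySem.List.pyRange_neg_one_eq_nil h]
    simp [flaLoopA, flbFindEnd]
  · obtain ⟨n, rfl⟩ : ∃ n : Nat, stop = (n : Int) := ⟨stop.toNat, by omega⟩
    exact flaLoop_search disk n

-- ===== B = R =====

-- inner loop characterization: it returns the end of the run of v starting at j
theorem inner_char (disk : List Int) (stp v : Int) :
    ∀ (f : Nat) (j : Int), stp + 1 ≤ (f : Int) + j → j ≤ stp + 1 →
      j ≤ flbInner disk stp v f j ∧ flbInner disk stp v f j ≤ stp + 1 ∧
      (∀ k, j ≤ k → k < flbInner disk stp v f j → gA disk k = v) ∧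
      (stp < flbInner disk stp v f j ∨ gA disk (flbInner disk stp v f j) ≠ v)
  | 0, j, hf, hj => by
      refine ⟨le_refl _, hj, fun k hk hk' => absurd (lt_of_le_of_lt hk hk') (lt_irrefl _), ?_⟩
      left; simp only [flbInner]; omega
  | f + 1, j, hf, hj => by
      simp only [flbInner]
      by_cases hc : j ≤ stp ∧ (PySem.List.pyGet? disk j).getD 0 = v
      · rw [if_pos hc]
        obtain ⟨ih1, ih2, ih3, ih4⟩ :=
          inner_char disk stp v f (j + 1) (by push_cast at hf ⊢; omega) (by omega)
        refine ⟨by omega, ih2, fun k hk hk' => ?_, ih4⟩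
        rcases eq_or_lt_of_le hk with h | h
        · subst h; exact hc.2
        · exact ih3 k (by omega) hk'
      · rw [if_neg hc]
        refine ⟨le_refl _, hj, fun k hk hk' => absurd (lt_of_le_of_lt hk hk') (lt_irrefl _), ?_⟩
        by_cases hs : j ≤ stp
        · right; exact fun hv => hc ⟨hs, hv⟩
        · left; omega

theorem outer_stop (disk : List Int) (stp : Int) (f : Nat) (i : Int)
    (best : Int × Int × Int) (h : stp < i) :
    flbOuter disk stp f i best = best := by
  cases f with
  | zero => rfl
  | succ f => simp only [flbOuter]; rw [if_neg (by omega)]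

-- findEnd skips trailing -1s
theorem findEnd_skip (disk : List Int) :
    ∀ (n : Nat) (m : Int), -1 ≤ m → m ≤ (n : Int) →
      (∀ k, m < k → k ≤ (n : Int) → gA disk k = -1) →
      flbFindEnd disk (PySem.List.pyRange (n : Int) (-1) (-1))
        = flbFindEnd disk (PySem.List.pyRange m (-1) (-1))
  | n, m, hm, hmn, hall => by
      rcases eq_or_lt_of_le hmn with h | h
      · rw [h]
      · rw [PySem.List.pyRange_neg_one_cons (by omega : (-1 : Int) < (n : Int))]
        simp only [flbFindEnd]
        rw [if_neg (by simpa [gA] using hall (n : Int) h (le_refl _))]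
        cases n with
        | zero =>
            rw [show ((0 : Nat) : Int) - 1 = -1 by norm_num]
            have : m = -1 := by omega
            rw [this]
        | succ p =>
            rw [show ((p + 1 : Nat) : Int) - 1 = (p : Int) by push_cast; ring]
            exact findEnd_skip disk p m hm (by push_cast at h ⊢; omega)
              (fun k hk hk' => hall k hk (by push_cast at hk' ⊢; omega))

theorem findEnd_hit (disk : List Int) (e : Int) (h0 : 0 ≤ e) (hv : gA disk e ≠ -1) :
    flbFindEnd disk (PySem.List.pyRange e (-1) (-1)) = some e := by
  rw [PySem.List.pyRange_neg_one_cons (by omega : (-1 : Int) < e)]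
  simp only [flbFindEnd]
  rw [if_pos (by simpa [gA] using hv)]

-- walk goes back exactly to the left boundary of the run
theorem walk_eq (disk : List Int) (v i : Int) (h0 : 0 ≤ i)
    (hb : i = 0 ∨ gA disk (i - 1) ≠ v) :
    ∀ s : Nat, i ≤ (s : Int) → (∀ k, i ≤ k → k < (s : Int) → gA disk k = v) →
      ((flbWalk disk v s : Nat) : Int) = i
  | 0, hs, _ => by simp only [flbWalk]; omega
  | s + 1, hs, hrun => by
      simp only [flbWalk]
      by_cases hi : i ≤ (s : Int)
      · rw [if_pos (by simpa [gA] using hrun (s : Int) hi (by push_cast; omega))]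
        exact walk_eq disk v i h0 hb s hi
          (fun k hk hk' => hrun k hk (by push_cast; omega))
      · have hieq : i = (s : Int) + 1 := by push_cast at hs; omega
        have : gA disk (s : Int) ≠ v := by
          rcases hb with h | h
          · omega
          · rw [show (s : Int) = i - 1 by omega]; exact h
        rw [if_neg (by simpa [gA] using this)]
        push_cast; omega

-- the outer-loop invariant: from a run boundary i, B computes R unless disk[i..stop] is all -1
theorem outer_inv (disk : List Int) (stp : Int) :
    ∀ (f : Nat) (i : Int) (best : Int × Int × Int),
      0 ≤ i → stp + 1 ≤ (f : Int) + i →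
      (i = 0 ∨ gA disk (i - 1) ≠ gA disk i) →
      ((∀ k, i ≤ k → k ≤ stp → gA disk k = -1) → flbOuter disk stp f i best = best) ∧
      ((∃ k, i ≤ k ∧ k ≤ stp ∧ gA disk k ≠ -1) → flbOuter disk stp f i best = flaRef disk stp)
  | 0, i, best, h0, hf, hb => by
      refine ⟨fun _ => rfl, fun ⟨k, hk1, hk2, _⟩ => ?_⟩
      exfalso; push_cast at hf; omega
  | f + 1, i, best, h0, hf, hb => by
      by_cases his : i ≤ stp
      · have hbody : flbOuter disk stp (f + 1) i best =
            flbOuter disk stp f (flbInner disk stp ((PySem.List.pyGet? disk i).getD 0) (stp - i).toNat (i + 1))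
              (if (PySem.List.pyGet? disk i).getD 0 ≠ -1 then
                (i, (PySem.List.pyGet? disk i).getD 0,
                 flbInner disk stp ((PySem.List.pyGet? disk i).getD 0) (stp - i).toNat (i + 1) - i)
               else best) := by
          simp only [flbOuter]; rw [if_pos his]
        set v := (PySem.List.pyGet? disk i).getD 0 with hv
        set j := flbInner disk stp v (stp - i).toNat (i + 1) with hj
        have hgi : gA disk i = v := rfl
        obtain ⟨hi1, hi2, hi3, hi4⟩ :=
          inner_char disk stp v (stp - i).toNat (i + 1)
            (by rw [Int.toNat_of_nonneg (by omega)]; omega) (by omega)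
        rw [← hj] at hi1 hi2 hi3 hi4
        have hrun : ∀ k, i ≤ k → k < j → gA disk k = v := by
          intro k hk hk'
          rcases eq_or_lt_of_le hk with h | h
          · rw [← h]; exact hgi
          · exact hi3 k (by omega) hk'
        constructor
        · -- all of [i..stop] is -1: v = -1, best is passed through unchanged
          intro hall
          have hvm : v = -1 := by rw [← hgi]; exact hall i (le_refl _) his
          rw [hbody, if_neg (by simp [hvm])]
          rcases hi4 with hcase | hcase
          · exact outer_stop disk stp f j best hcase
          · exact (outer_inv disk stp f j best (by omega) (by push_cast at hf ⊢; omega)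
              (Or.inr (by rw [hrun (j - 1) (by omega) (by omega)]; exact fun h => hcase h.symm))).1
              (fun k hk1 hk2 => hall k (by omega) hk2)
        · -- some non -1 value in [i..stop]: the result is R
          rintro ⟨k₀, hk1, hk2, hk3⟩
          rcases hi4 with hcase | hcase
          · -- j = stop + 1: the run [i..stop] is all v, and v ≠ -1 since k₀ is in it
            have hje : j = stp + 1 := by omega
            have hvne : v ≠ -1 := by
              rw [← hrun k₀ hk1 (by omega)]; exact hk3
            rw [hbody, if_pos hvne, outer_stop disk stp f j _ (by omega)]
            unfold flaRef
            have hstop0 : (0 : Int) ≤ stp := by omega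
            rw [findEnd_hit disk stp hstop0
              (by rw [hrun stp his (by omega)]; exact hvne)]
            simp only
            have hnum : (PySem.List.pyGet? disk stp).getD 0 = v := hrun stp his (by omega)
            rw [hnum]
            have hw : ((flbWalk disk v stp.toNat : Nat) : Int) = i :=
              walk_eq disk v i h0 hb stp.toNat
                (by rw [Int.toNat_of_nonneg hstop0]; omega)
                (fun k hk hk' => hrun k hk (by rw [Int.toNat_of_nonneg hstop0] at hk'; omega))
            rw [hw]
            congr 2
            omega
          · -- j ≤ stop and disk[j] ≠ v: j is a boundary
            have hjb : j = 0 ∨ gA disk (j - 1) ≠ gA disk j := by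
              right
              rw [hrun (j - 1) (by omega) (by omega)]
              exact fun h => hcase h.symm
            by_cases hall2 : ∀ k, j ≤ k → k ≤ stp → gA disk k = -1
            · -- rest is all -1: the last non -1 run is [i..j)
              have hvne : v ≠ -1 := by
                have hk0j : k₀ < j := by
                  by_contra h
                  exact hk3 (hall2 k₀ (by omega) hk2)
                rw [← hrun k₀ hk1 hk0j]; exact hk3
              rw [hbody, if_pos hvne,
                (outer_inv disk stp f j _ (by omega) (by push_cast at hf ⊢; omega) hjb).1 hall2]
              unfold flaRef
              obtain ⟨n, hn⟩ : ∃ n : Nat, stp = (n : Int) := ⟨stp.toNat, by omega⟩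
              rw [hn, findEnd_skip disk n (j - 1) (by omega) (by omega)
                  (fun k hk hk' => hall2 k (by omega) (by omega))]
              rw [findEnd_hit disk (j - 1) (by omega)
                (by rw [hrun (j - 1) (by omega) (by omega)]; exact hvne)]
              simp only
              have hnum : (PySem.List.pyGet? disk (j - 1)).getD 0 = v :=
                hrun (j - 1) (by omega) (by omega)
              rw [hnum]
              have hw : ((flbWalk disk v (j - 1).toNat : Nat) : Int) = i :=
                walk_eq disk v i h0 hb (j - 1).toNat
                  (by rw [Int.toNat_of_nonneg (by omega)]; omega)
                  (fun k hk hk' => hrun k hk (by rw [Int.toNat_of_nonneg (by omega)] at hk'; omega))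
              rw [hw]
              congr 2
              omega
            · -- a non -1 value remains beyond j: recurse
              push_neg at hall2
              obtain ⟨k₁, hk11, hk12, hk13⟩ := hall2
              rw [hbody]
              exact (outer_inv disk stp f j _ (by omega) (by push_cast at hf ⊢; omega) hjb).2
                ⟨k₁, hk11, hk12, hk13⟩
      · refine ⟨fun _ => ?_, fun ⟨k, hk1, hk2, _⟩ => by exfalso; omega⟩
        simp only [flbOuter]; rw [if_neg his]

theorem alt_eq_ref (disk : List Int) (stop : Int) :
    find_last_block_alt disk stop = flaRef disk stop := by
  unfold find_last_block_alt
  by_cases h : stop < 0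
  · rw [outer_stop disk stop _ 0 _ (by omega)]
    unfold flaRef
    rw [PySem.List.pyRange_neg_one_eq_nil (by omega)]
    rfl
  · push_neg at h
    by_cases hall : ∀ k, (0 : Int) ≤ k → k ≤ stop → gA disk k = -1
    · rw [(outer_inv disk stop (stop + 1).toNat 0 (0, 0, 0) (le_refl _)
        (by rw [Int.toNat_of_nonneg (by omega)]; omega) (Or.inl rfl)).1 hall]
      unfold flaRef
      obtain ⟨n, hn⟩ : ∃ n : Nat, stop = (n : Int) := ⟨stop.toNat, by omega⟩
      rw [hn, findEnd_skip disk n (-1) (le_refl _) (by omega)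
          (fun k hk hk' => hall k (by omega) (by omega)),
        PySem.List.pyRange_neg_one_eq_nil (le_refl _)]
      rfl
    · push_neg at hall
      obtain ⟨k, hk1, hk2, hk3⟩ := hall
      exact (outer_inv disk stop (stop + 1).toNat 0 (0, 0, 0) (le_refl _)
        (by rw [Int.toNat_of_nonneg (by omega)]; omega) (Or.inl rfl)).2 ⟨k, hk1, hk2, hk3⟩

-- ===== VERDICT (by name: the statement is the Claim_ definition above) =====
theorem find_last_block_spec : Claim_equal_find_last_block := by
  intro disk stop _ _
  unfold Spec_find_last_block
  rw [a_eq_ref disk stop, alt_eq_ref disk stop]
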